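-- pv_equiv track=rewrite | github.com/GU-DataLab/Demographic-Inference | DITL/helper.py | check_early
-- ===== SOURCE A (Python) =====
-- def check_early(vals_early, flag=8):
--     for i in range(len(vals_early)):
--         count = 0
--         for j in range(i+1, min(len(vals_early), i+flag+1)):
--             if vals_early[i] < vals_early[j]:
--                 count += 1
--         if count == flag:
--             return i
--     return None
-- ===== SOURCE B (Python) =====
-- def check_early(vals_early, flag=8):
--     # One-pass monotonic stack: index i qualifies iff the next `flag` elements all
--     # exceed vals_early[i]; a candidate stays on the stack while that holds, and the
--     # earliest candidate that survives `flag` steps is returned.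
--     n = len(vals_early)
--     if flag < 0:
--         return None
--     if flag == 0:
--         return 0 if n > 0 else None
--     stack = []  # candidate indices; values strictly increasing bottom -> top
--     for j in range(n):
--         while stack and vals_early[stack[-1]] >= vals_early[j]:
--             stack.pop()
--         if stack and j - stack[0] == flag:
--             return stack[0]
--         stack.append(j)
--     return None
-- ===== Notes on version B (the rewrite author's own statement) =====
-- stated objective: faster
-- what changed: Replaced A's per-index rescan of the next `flag` elements by a single left-to-right sweep with a monotonic stack of surviving candidate indices, returning the earliest candidate whose next `flag` elements all exceed it.
import Mathlib
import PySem

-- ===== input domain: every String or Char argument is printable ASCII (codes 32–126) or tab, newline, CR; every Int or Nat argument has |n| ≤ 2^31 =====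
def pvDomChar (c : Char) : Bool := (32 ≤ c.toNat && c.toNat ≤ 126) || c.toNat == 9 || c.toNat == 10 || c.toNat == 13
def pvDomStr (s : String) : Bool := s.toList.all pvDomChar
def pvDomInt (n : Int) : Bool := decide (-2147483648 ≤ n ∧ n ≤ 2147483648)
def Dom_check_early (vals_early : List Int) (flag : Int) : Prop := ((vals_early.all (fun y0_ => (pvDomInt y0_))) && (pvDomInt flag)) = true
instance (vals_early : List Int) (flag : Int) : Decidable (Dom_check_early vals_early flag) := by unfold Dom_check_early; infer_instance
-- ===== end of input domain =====

-- B replaces A's O(n·flag) nested re-scan by a one-pass monotonic-stack sweep (O(n));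
-- proved to return exactly A's value on every input.


-- ===== PORT A =====
-- inner loop: count = number of j in range(i+1, min(len, i+flag+1)) with vals[i] < vals[j]
def ceA_count (vals : List Int) (i : Int) (flag : Int) : Int :=
  (PySem.List.pyRange (i+1) (min (vals.length : Int) (i+flag+1)) 1).foldl
    (fun count j =>
      if PySem.List.pyGetD vals i 0 < PySem.List.pyGetD vals j 0 then count + 1 else count) 0

-- outer loop over i in range(len(vals_early)) with early return
def ceA_go (vals : List Int) (flag : Int) : List Int → Option Int
  | [] => none
  | i :: rest => if ceA_count vals i flag = flag then some i else ceA_go vals flag rest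

def check_early (vals_early : List Int) (flag : Int) : Option Int :=
  ceA_go vals_early flag (PySem.List.pyRange 0 (vals_early.length : Int) 1)

-- ===== PORT B =====
-- while stack and vals[stack[-1]] >= vals[j]: stack.pop()   (stack top at HEAD here)
def ceB_pop (vals : List Int) (vj : Int) : List Nat → List Nat
  | [] => []
  | c :: s => if vj ≤ vals.getD c 0 then ceB_pop vals vj s else c :: s

-- for j in range(n): pop; if stack and j - stack[0] == flag: return stack[0]; append j
def ceB_loop (vals : List Int) (flag : Int) : List Nat → List Nat → Option Int
  | _, [] => none
  | stack, j :: js =>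
    let s := ceB_pop vals (vals.getD j 0) stack
    match s.getLast? with
    | some b => if (j : Int) - (b : Int) = flag then some (b : Int)
                else ceB_loop vals flag (j :: s) js
    | none => ceB_loop vals flag (j :: s) js

def check_early_alt (vals_early : List Int) (flag : Int) : Option Int :=
  if flag < 0 then none
  else if flag = 0 then (if vals_early.length > 0 then some 0 else none)
  else ceB_loop vals_early flag [] (List.range vals_early.length)

-- ===== PRECONDITION & SPEC =====
def Spec_check_early (vals_early : List Int) (flag : Int) (out : Option Int) : Prop := out = check_early_alt vals_early flag
instance (vals_early : List Int) (flag : Int) (out : Option Int) : Decidable (Spec_check_early vals_early flag out) := by unfold Spec_check_early; infer_instance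

-- ===== CLAIM (what is proved, stated in full; the proofs are below) =====
def Claim_equal_check_early : Prop := ∀ (vals_early : List Int) (flag : Int), Dom_check_early vals_early flag → Spec_check_early vals_early flag (check_early vals_early flag)

-- ===== LEMMAS AND PROOFS =====

-- the common specification: "i qualifies" — window of size flag is full and all its elements exceed vals[i]
def ceQ (vals : List Int) (F : Nat) (i : Nat) : Bool :=
  decide (i + F < vals.length) &&
    (List.range' (i+1) F).all (fun k => decide (vals.getD i 0 < vals.getD k 0))

theorem ceQ_iff (vals : List Int) (F : Nat) (i : Nat) :
    ceQ vals F i = true ↔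
      (i + F < vals.length ∧ ∀ k, i < k → k ≤ i + F → vals.getD i 0 < vals.getD k 0) := by
  simp only [ceQ, Bool.and_eq_true, decide_eq_true_eq, List.all_eq_true, List.mem_range'_1]
  constructor
  · rintro ⟨h1, h2⟩
    exact ⟨h1, fun k hk1 hk2 => h2 k ⟨by omega, by omega⟩⟩
  · rintro ⟨h1, h2⟩
    exact ⟨h1, fun k hk => h2 k (by omega) (by omega)⟩

-- generic: the counting foldl is countP
theorem ceA_foldl_count (p : Int → Prop) [DecidablePred p] (l : List Int) (c : Int) :
    l.foldl (fun count j => if p j then count + 1 else count) c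
      = c + l.countP (fun j => decide (p j)) := by
  induction l generalizing c with
  | nil => simp
  | cons x t ih =>
    by_cases h : p x <;> simp [h, ih] <;> ring

theorem ceA_count_eq (vals : List Int) (i flag : Int) :
    ceA_count vals i flag =
      ((PySem.List.pyRange (i+1) (min (vals.length : Int) (i+flag+1)) 1).countP
        (fun j => decide (PySem.List.pyGetD vals i 0 < PySem.List.pyGetD vals j 0)) : Nat) := by
  unfold ceA_count
  rw [ceA_foldl_count (fun j => PySem.List.pyGetD vals i 0 < PySem.List.pyGetD vals j 0)]
  simp

theorem ceA_count_nonneg (vals : List Int) (i flag : Int) : 0 ≤ ceA_count vals i flag := by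
  rw [ceA_count_eq]; positivity

-- characterization of A's test for flag > 0 and i < n
theorem ceA_count_iff (vals : List Int) (flag : Int) (hf : 0 < flag) (i : Nat)
    (hi : i < vals.length) :
    (ceA_count vals (i : Int) flag = flag) ↔ ceQ vals flag.toNat i = true := by
  have hcast : ((flag.toNat : Int)) = flag := Int.toNat_of_nonneg hf.le
  rw [ceA_count_eq, ceQ_iff]
  by_cases hwin : i + flag.toNat < vals.length
  · have hmin : min (vals.length : Int) ((i:Int)+flag+1) = (i:Int)+flag+1 := by
      apply min_eq_right; omega
    rw [hmin]
    have hlen : (PySem.List.pyRange ((i:Int)+1) ((i:Int)+flag+1) 1).length = flag.toNat := by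
      rw [PySem.List.length_pyRange_one]; omega
    constructor
    · intro hc
      refine ⟨hwin, fun k hk1 hk2 => ?_⟩
      have hcnt : (PySem.List.pyRange ((i:Int)+1) ((i:Int)+flag+1) 1).countP
          (fun j => decide (PySem.List.pyGetD vals (i:Int) 0 < PySem.List.pyGetD vals j 0))
          = (PySem.List.pyRange ((i:Int)+1) ((i:Int)+flag+1) 1).length := by omega
      have hall := (List.countP_eq_length).mp hcnt ((k:Int))
        (by rw [PySem.List.mem_pyRange_one]; omega)
      simp only [decide_eq_true_eq, PySem.List.pyGetD_natCast] at hall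
      exact hall
    · rintro ⟨-, hall⟩
      have : (PySem.List.pyRange ((i:Int)+1) ((i:Int)+flag+1) 1).countP
          (fun j => decide (PySem.List.pyGetD vals (i:Int) 0 < PySem.List.pyGetD vals j 0))
          = (PySem.List.pyRange ((i:Int)+1) ((i:Int)+flag+1) 1).length := by
        rw [List.countP_eq_length]
        intro j hj
        rw [PySem.List.mem_pyRange_one] at hj
        have hj0 : 0 ≤ j := by omega
        have hjk : j = ((j.toNat : Nat) : Int) := by omega
        rw [hjk]
        simp only [decide_eq_true_eq, PySem.List.pyGetD_natCast]
        exact hall j.toNat (by omega) (by omega)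
      omega
  · have hmin : min (vals.length : Int) ((i:Int)+flag+1) = (vals.length : Int) := by
      apply min_eq_left; omega
    rw [hmin]
    have hlen : (PySem.List.pyRange ((i:Int)+1) (vals.length : Int) 1).length
        = vals.length - i - 1 := by
      rw [PySem.List.length_pyRange_one]; omega
    have hle := List.countP_le_length
      (p := fun j => decide (PySem.List.pyGetD vals (i:Int) 0 < PySem.List.pyGetD vals j 0))
      (l := PySem.List.pyRange ((i:Int)+1) (vals.length : Int) 1)
    constructor
    · intro hc; omega
    · rintro ⟨h1, -⟩; omega

-- A's outer loop is find? over the index list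
theorem ceA_go_find (vals : List Int) (flag : Int) (hf : 0 < flag) (l : List Nat)
    (hl : ∀ i ∈ l, i < vals.length) :
    ceA_go vals flag (l.map (fun i : Nat => (i : Int))) =
      (l.find? (ceQ vals flag.toNat)).map (fun i : Nat => (i : Int)) := by
  induction l with
  | nil => simp [ceA_go]
  | cons i t ih =>
    have hi : i < vals.length := hl i (by simp)
    have ht : ∀ j ∈ t, j < vals.length := fun j hj => hl j (by simp [hj])
    by_cases h : ceQ vals flag.toNat i = true
    · have hc := (ceA_count_iff vals flag hf i hi).mpr h
      rw [List.map_cons, List.find?_cons_of_pos h]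
      simp [ceA_go, hc]
    · have hc : ¬ (ceA_count vals (i:Int) flag = flag) := fun hcc =>
        h ((ceA_count_iff vals flag hf i hi).mp hcc)
      rw [List.map_cons, List.find?_cons_of_neg (by simpa using h)]
      simp only [ceA_go, if_neg hc]
      exact ih ht

theorem ceA_eq_find (vals : List Int) (flag : Int) (hf : 0 < flag) :
    check_early vals flag =
      ((List.range vals.length).find? (ceQ vals flag.toNat)).map (fun i : Nat => (i : Int)) := by
  unfold check_early
  rw [PySem.List.pyRange_zero_natCast]
  exact ceA_go_find vals flag hf _ (by simp)

-- with flag = 0, every inner window is empty, so every count is 0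
theorem ceA_count_zero (vals : List Int) (i : Nat) (hi : i < vals.length) :
    ceA_count vals (i : Int) 0 = 0 := by
  unfold ceA_count
  rw [show min ((vals.length : Int)) ((i:Int)+0+1) = (i:Int)+0+1 from by apply min_eq_right; omega]
  rw [show (i:Int)+0+1 = (i:Int)+1 from by ring]
  rw [PySem.List.pyRange_one_eq_nil le_rfl]
  rfl

-- A returns none when no index passes its test
theorem ceA_go_none (vals : List Int) (flag : Int) (l : List Int)
    (h : ∀ i ∈ l, ceA_count vals i flag ≠ flag) : ceA_go vals flag l = none := by
  induction l with
  | nil => rfl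
  | cons i t ih =>
    simp only [ceA_go, if_neg (h i (by simp))]
    exact ih (fun j hj => h j (by simp [hj]))

-- find? over range n localized by a witness
theorem find?_range_eq_some {p : Nat → Bool} {n i0 : Nat} (h0 : i0 < n) (h1 : p i0 = true)
    (h2 : ∀ i, i < i0 → p i = false) : (List.range n).find? p = some i0 := by
  have hsplit : List.range i0 ++ List.range' i0 (n - i0) = List.range n := by
    have h' := List.range'_append_1 (s := 0) (m := i0) (n := n - i0)
    rw [Nat.zero_add] at h'
    rw [show List.range i0 = List.range' 0 i0 from List.range_eq_range', h',
      show i0 + (n - i0) = n from by omega, ← List.range_eq_range']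
  rw [← hsplit, List.find?_append]
  have hnone : (List.range i0).find? p = none := by
    rw [List.find?_eq_none]; intro i hi; simp [h2 i (List.mem_range.mp hi)]
  rw [hnone]
  have hr : n - i0 = (n - i0 - 1) + 1 := by omega
  rw [hr, List.range'_succ, Option.none_or, List.find?_cons, h1]

-- ceB_pop returns a suffix
theorem ceB_pop_suffix (vals : List Int) (vj : Int) (s : List Nat) :
    ceB_pop vals vj s <:+ s := by
  induction s with
  | nil => simp [ceB_pop]
  | cons c t ih =>
    unfold ceB_pop
    split
    · exact ih.trans (List.suffix_cons c t)
    · exact List.suffix_rfl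

-- membership after popping, given values strictly decrease along the stack
theorem ceB_pop_mem (vals : List Int) (vj : Int) (s : List Nat)
    (hs : s.Pairwise (fun a b => vals.getD b 0 < vals.getD a 0)) (c : Nat) :
    c ∈ ceB_pop vals vj s ↔ c ∈ s ∧ vals.getD c 0 < vj := by
  induction s with
  | nil => simp [ceB_pop]
  | cons c0 t ih =>
    rw [List.pairwise_cons] at hs
    unfold ceB_pop
    split
    · rename_i hge
      rw [ih hs.2]
      constructor
      · rintro ⟨hc, hv⟩; exact ⟨by simp [hc], hv⟩
      · rintro ⟨hc, hv⟩
        rcases List.mem_cons.mp hc with rfl | hc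
        · omega
        · exact ⟨hc, hv⟩
    · rename_i hlt
      rw [not_le] at hlt
      constructor
      · intro hc
        rcases List.mem_cons.mp hc with rfl | hc
        · exact ⟨by simp, hlt⟩
        · exact ⟨by simp [hc], lt_trans (hs.1 c hc) hlt⟩
      · rintro ⟨hc, _⟩; exact hc

-- last of a strictly-decreasing list is its minimum
theorem getLast?_min (s : List Nat) (hs : s.Pairwise (fun a b : Nat => a > b)) (b : Nat)
    (hb : s.getLast? = some b) : b ∈ s ∧ ∀ c ∈ s, b ≤ c := by
  induction s with
  | nil => simp at hb
  | cons c0 t ih =>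
    rw [List.pairwise_cons] at hs
    cases t with
    | nil => simp_all
    | cons c1 t' =>
      rw [List.getLast?_cons_cons] at hb
      obtain ⟨hbmem, hmin⟩ := ih hs.2 hb
      refine ⟨by simp [hbmem], ?_⟩
      intro c hc
      rcases List.mem_cons.mp hc with rfl | hc
      · exact le_of_lt (hs.1 b hbmem)
      · exact hmin c hc

-- the main loop invariant proof
theorem ceB_loop_eq (vals : List Int) (flag : Int) (hf : 0 < flag) (j : Nat)
    (hj : j ≤ vals.length) (s : List Nat)
    (h1 : s.Pairwise (fun a b : Nat => a > b))
    (h2 : ∀ c, c ∈ s ↔ (c < j ∧ ∀ k, c < k → k < j → vals.getD c 0 < vals.getD k 0))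
    (h4 : ∀ i, ceQ vals flag.toNat i = true → j ≤ i + flag.toNat) :
    ceB_loop vals flag s (List.range' j (vals.length - j)) =
      ((List.range vals.length).find? (ceQ vals flag.toNat)).map (fun i : Nat => (i : Int)) := by
  have hcast : ((flag.toNat : Int)) = flag := Int.toNat_of_nonneg hf.le
  have hF : 0 < flag.toNat := by omega
  induction hd : vals.length - j generalizing j s with
  | zero =>
    have hjn : j = vals.length := by omega
    simp only [List.range'_zero, ceB_loop]
    have : (List.range vals.length).find? (ceQ vals flag.toNat) = none := by
      rw [List.find?_eq_none]
      intro i hi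
      by_contra hq
      have := h4 i hq
      have := ((ceQ_iff vals flag.toNat i).mp hq).1
      omega
    rw [this]; rfl
  | succ m ih =>
    have hjn : j < vals.length := by omega
    rw [List.range'_succ]
    -- one step of the loop
    have hvalsort : s.Pairwise (fun a b => vals.getD b 0 < vals.getD a 0) := by
      have hmem := fun c => (h2 c).mp
      refine List.Pairwise.imp_of_mem ?_ h1
      intro a b ha hb hab
      obtain ⟨hbj, hbf⟩ := hmem b hb
      obtain ⟨haj, -⟩ := hmem a ha
      exact hbf a hab haj
    set s' := ceB_pop vals (vals.getD j 0) s with hs'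
    have hsub : s' <:+ s := ceB_pop_suffix vals (vals.getD j 0) s
    have hpair' : s'.Pairwise (fun a b : Nat => a > b) := h1.sublist hsub.sublist
    have hmem' : ∀ c, c ∈ s' ↔ c ∈ s ∧ vals.getD c 0 < vals.getD j 0 :=
      ceB_pop_mem vals (vals.getD j 0) s hvalsort
    have hmem'' : ∀ c, c ∈ s' ↔
        (c < j ∧ ∀ k, c < k → k < j + 1 → vals.getD c 0 < vals.getD k 0) := by
      intro c
      rw [hmem' c, h2 c]
      constructor
      · rintro ⟨⟨hcj, hall⟩, hcv⟩
        refine ⟨hcj, fun k hk1 hk2 => ?_⟩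
        rcases Nat.lt_succ_iff_lt_or_eq.mp hk2 with hk | rfl
        · exact hall k hk1 hk
        · exact hcv
      · rintro ⟨hcj, hall⟩
        exact ⟨⟨hcj, fun k hk1 hk2 => hall k hk1 (by omega)⟩, hall j hcj (by omega)⟩
    have hmemnew : ∀ c, c ∈ j :: s' ↔
        (c < j + 1 ∧ ∀ k, c < k → k < j + 1 → vals.getD c 0 < vals.getD k 0) := by
      intro c
      rw [List.mem_cons, hmem'' c]
      constructor
      · rintro (rfl | ⟨hcj, hall⟩)
        · exact ⟨by omega, fun k hk1 hk2 => by omega⟩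
        · exact ⟨by omega, hall⟩
      · rintro ⟨hcj, hall⟩
        rcases Nat.lt_succ_iff_lt_or_eq.mp hcj with hc | rfl
        · exact Or.inr ⟨hc, hall⟩
        · exact Or.inl rfl
    have hpairnew : (j :: s').Pairwise (fun a b : Nat => a > b) := by
      rw [List.pairwise_cons]
      exact ⟨fun c hc => ((hmem'' c).mp hc).1, hpair'⟩
    -- the case "some i completes its window exactly now" forces a return
    have hcomplete : ∀ i, ceQ vals flag.toNat i = true → i + flag.toNat = j → i ∈ s' := by
      intro i hq hij
      rw [ceQ_iff] at hq
      rw [hmem'' i]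
      exact ⟨by omega, fun k hk1 hk2 => hq.2 k hk1 (by omega)⟩
    simp only [ceB_loop]
    cases hb : s'.getLast? with
    | none =>
      change ceB_loop vals flag (j :: s') (List.range' (j + 1) m) = _
      have hnil : s' = [] := List.getLast?_eq_none_iff.mp hb
      have h4' : ∀ i, ceQ vals flag.toNat i = true → j + 1 ≤ i + flag.toNat := by
        intro i hq
        have := h4 i hq
        rcases Nat.lt_or_ge j (i + flag.toNat) with h | h
        · omega
        · exfalso
          have hij : i + flag.toNat = j := by omega
          have := hcomplete i hq hij
          simp [hnil] at this
      have := ih (j+1) (by omega) (j :: s') hpairnew hmemnew h4' (by omega)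
      simpa using this
    | some b =>
      change (if (j : Int) - (b : Int) = flag then some ((b : Int))
          else ceB_loop vals flag (j :: s') (List.range' (j + 1) m)) = _
      obtain ⟨hbmem, hbmin⟩ := getLast?_min s' hpair' b hb
      have hbj : b < j := ((hmem'' b).mp hbmem).1
      by_cases hret : (j : Int) - (b : Int) = flag
      · rw [if_pos hret]
        have hjb : j = b + flag.toNat := by omega
        have hQb : ceQ vals flag.toNat b = true := by
          rw [ceQ_iff]
          refine ⟨by omega, fun k hk1 hk2 => ?_⟩
          exact ((hmem'' b).mp hbmem).2 k hk1 (by omega)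
        have hmin : ∀ i, i < b → ceQ vals flag.toNat i = false := by
          intro i hib
          by_contra hq
          rw [Bool.not_eq_false] at hq
          have := h4 i hq
          omega
        rw [find?_range_eq_some (by omega) hQb hmin]
        rfl
      · rw [if_neg hret]
        have h4' : ∀ i, ceQ vals flag.toNat i = true → j + 1 ≤ i + flag.toNat := by
          intro i hq
          have := h4 i hq
          rcases Nat.lt_or_ge j (i + flag.toNat) with h | h
          · omega
          · exfalso
            have hij : i + flag.toNat = j := by omega
            have hi' : i ∈ s' := hcomplete i hq hij
            have hbi : b ≤ i := hbmin i hi'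
            have hgap : flag.toNat ≤ j - b := by omega
            rcases Nat.lt_or_ge (j - b) (flag.toNat + 1) with hg | hg
            · exact hret (by omega)
            · -- j - b > flag: b itself qualified earlier, contradicting h4
              have hQb : ceQ vals flag.toNat b = true := by
                rw [ceQ_iff]
                refine ⟨by omega, fun k hk1 hk2 => ?_⟩
                exact ((hmem'' b).mp hbmem).2 k hk1 (by omega)
              have := h4 b hQb
              omega
        have := ih (j+1) (by omega) (j :: s') hpairnew hmemnew h4' (by omega)
        simpa using this

-- the verdict, case split on flag
theorem main_eq (vals : List Int) (flag : Int) :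
    check_early vals flag = check_early_alt vals flag := by
  rcases lt_trichotomy flag 0 with hneg | h0 | hpos
  · -- flag < 0: both none
    rw [check_early_alt, if_pos hneg]
    unfold check_early
    apply ceA_go_none
    intro i hi
    have := ceA_count_nonneg vals i flag
    omega
  · -- flag = 0
    subst h0
    cases vals with
    | nil => rfl
    | cons x t =>
      have hn : 0 < (x :: t).length := by simp
      rw [check_early_alt, if_neg (by omega), if_pos rfl, if_pos hn]
      unfold check_early
      rw [PySem.List.pyRange_zero_natCast]
      have hr : List.range (x :: t).length = 0 :: (List.range t.length).map Nat.succ := by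
        simp [List.range_succ_eq_map]
      rw [hr]
      simp only [List.map_cons, ceA_go]
      rw [if_pos (ceA_count_zero (x :: t) 0 (by simp))]
      norm_num
  · -- flag > 0
    rw [ceA_eq_find vals flag hpos]
    rw [check_early_alt, if_neg (by omega), if_neg (by omega)]
    have h := ceB_loop_eq vals flag hpos 0 (by omega) []
      (by simp) (by simp) (fun i _ => by omega)
    rw [Nat.sub_zero, ← List.range_eq_range'] at h
    exact h.symm

-- ===== VERDICT (by name: the statement is the Claim_ definition above) =====
theorem check_early_spec : Claim_equal_check_early := by
  intro vals flag _
  unfold Spec_check_early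
  exact main_eq vals flag
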